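-- pv_equiv track=rewrite | github.com/nc1729/ternary_computer | assemble_instr.py | unsigned_value_to_tryte
-- ===== SOURCE A (Python) =====
-- def unsigned_value_to_tryte(value):
--     septavingt_chars = "MLKJIHGFEDCBA0abcdefghijklm"
--     output_string = ""
--     dividend = int(value) - 9841
--     remainder = 0
--     for i in range(3):
--         remainder = dividend % 27
--         dividend = dividend // 27
--         if (remainder > 13):
--             remainder -= 27
--             dividend += 1
--         elif (remainder < -13):
--             remainder += 27
--             dividend -= 1
--         output_string += septavingt_chars[13 + remainder]
--     return output_string[::-1]
-- ===== SOURCE B (Python) =====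
-- def unsigned_value_to_tryte(value):
--     chars = "MLKJIHGFEDCBA0abcdefghijklm"
--     n = int(value)
--     return chars[(n // 729) % 27] + chars[(n // 27) % 27] + chars[n % 27]
-- ===== Notes on version B (the rewrite author's own statement) =====
-- stated objective: simpler
-- what changed: Replaced the balanced-remainder loop with carry correction, string accumulation and final reversal by direct indexings of the same table using the closed-form standard base-27 digits of n (the 9841 offset shifts each balanced digit into the standard range), most-significant first.
import Mathlib
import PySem

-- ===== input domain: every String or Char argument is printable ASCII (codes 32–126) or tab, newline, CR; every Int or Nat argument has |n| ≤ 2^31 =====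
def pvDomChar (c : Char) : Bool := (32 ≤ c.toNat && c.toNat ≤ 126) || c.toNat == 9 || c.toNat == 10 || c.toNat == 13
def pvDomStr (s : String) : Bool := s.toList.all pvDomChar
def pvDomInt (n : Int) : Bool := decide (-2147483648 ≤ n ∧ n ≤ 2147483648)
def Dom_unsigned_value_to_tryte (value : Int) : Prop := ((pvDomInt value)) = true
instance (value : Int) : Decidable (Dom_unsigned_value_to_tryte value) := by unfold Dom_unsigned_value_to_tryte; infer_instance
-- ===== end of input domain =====

-- B replaces A's balanced-remainder loop (carry correction + final reversal) by direct
-- closed-form base-27 digit lookups, most-significant first; objective: simpler.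


-- ===== PORT A =====
-- the digit table "MLKJIHGFEDCBA0abcdefghijklm"
def pvChars : List Char := "MLKJIHGFEDCBA0abcdefghijklm".toList

-- one iteration of A's for-loop: state is (output_string, dividend); the index
-- 13 + remainder is always in range 0..26, so .getD ' ' is never the default.
def pvStepA (st : List Char × Int) : List Char × Int :=
  let remainder := PySem.Int.mod st.2 27
  let dividend := PySem.Int.floordiv st.2 27
  let (remainder, dividend) :=
    if remainder > 13 then (remainder - 27, dividend + 1)
    else if remainder < -13 then (remainder + 27, dividend - 1)
    else (remainder, dividend)
  (st.1 ++ [(PySem.List.pyGet? pvChars (13 + remainder)).getD ' '], dividend)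

def unsigned_value_to_tryte (value : Int) : String :=
  let res := (List.range 3).foldl (fun st _ => pvStepA st) ([], value - 9841)
  String.mk res.1.reverse

-- ===== PORT B =====
def unsigned_value_to_tryte_alt (value : Int) : String :=
  String.mk
    [(PySem.List.pyGet? pvChars (PySem.Int.mod (PySem.Int.floordiv value 729) 27)).getD ' ',
     (PySem.List.pyGet? pvChars (PySem.Int.mod (PySem.Int.floordiv value 27) 27)).getD ' ',
     (PySem.List.pyGet? pvChars (PySem.Int.mod value 27)).getD ' ']

-- ===== PRECONDITION & SPEC =====
def Spec_unsigned_value_to_tryte (value : Int) (out : String) : Prop := out = unsigned_value_to_tryte_alt value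
instance (value : Int) (out : String) : Decidable (Spec_unsigned_value_to_tryte value out) := by unfold Spec_unsigned_value_to_tryte; infer_instance

-- ===== CLAIM (what is proved, stated in full; the proofs are below) =====
def Claim_equal_unsigned_value_to_tryte : Prop := ∀ (value : Int), Dom_unsigned_value_to_tryte value → Spec_unsigned_value_to_tryte value (unsigned_value_to_tryte value)

-- ===== LEMMAS AND PROOFS =====

-- A's corrected step on state (out, d) appends the char at index mod (d+13) 27 and
-- leaves dividend floordiv (d+13) 27.
theorem pvStepA_eq (out : List Char) (d : Int) :
    pvStepA (out, d)
      = (out ++ [(PySem.List.pyGet? pvChars (PySem.Int.mod (d + 13) 27)).getD ' '],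
         PySem.Int.floordiv (d + 13) 27) := by
  have h1 := PySem.Int.floordiv_mul_add_mod d 27
  have h2 := PySem.Int.floordiv_mul_add_mod (d + 13) 27
  have b1 := PySem.Int.mod_nonneg d (b := 27) (by norm_num)
  have b2 := PySem.Int.mod_lt d (b := 27) (by norm_num)
  have b3 := PySem.Int.mod_nonneg (d + 13) (b := 27) (by norm_num)
  have b4 := PySem.Int.mod_lt (d + 13) (b := 27) (by norm_num)
  unfold pvStepA
  dsimp only
  split_ifs with hgt hlt
  · have hm : PySem.Int.mod (d + 13) 27 = 13 + (PySem.Int.mod d 27 - 27) := by omega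
    have hd : PySem.Int.floordiv (d + 13) 27 = PySem.Int.floordiv d 27 + 1 := by omega
    rw [hm, hd]
  · omega
  · have hm : PySem.Int.mod (d + 13) 27 = 13 + PySem.Int.mod d 27 := by omega
    have hd : PySem.Int.floordiv (d + 13) 27 = PySem.Int.floordiv d 27 := by omega
    rw [hm, hd]

-- shifting by a multiple of 27 shifts the quotient and keeps the remainder
theorem pvShift27 (a k : Int) :
    PySem.Int.floordiv (a - 27 * k) 27 = PySem.Int.floordiv a 27 - k ∧
    PySem.Int.mod (a - 27 * k) 27 = PySem.Int.mod a 27 := by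
  have h1 := PySem.Int.floordiv_mul_add_mod (a - 27 * k) 27
  have h2 := PySem.Int.floordiv_mul_add_mod a 27
  have b1 := PySem.Int.mod_nonneg (a - 27 * k) (b := 27) (by norm_num)
  have b2 := PySem.Int.mod_lt (a - 27 * k) (b := 27) (by norm_num)
  have b3 := PySem.Int.mod_nonneg a (b := 27) (by norm_num)
  have b4 := PySem.Int.mod_lt a (b := 27) (by norm_num)
  omega

theorem pvDivDiv (a : Int) :
    PySem.Int.floordiv (PySem.Int.floordiv a 27) 27 = PySem.Int.floordiv a 729 := by
  have h1 := PySem.Int.floordiv_mul_add_mod a 27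
  have h2 := PySem.Int.floordiv_mul_add_mod (PySem.Int.floordiv a 27) 27
  have h3 := PySem.Int.floordiv_mul_add_mod a 729
  have b1 := PySem.Int.mod_nonneg a (b := 27) (by norm_num)
  have b2 := PySem.Int.mod_lt a (b := 27) (by norm_num)
  have b3 := PySem.Int.mod_nonneg (PySem.Int.floordiv a 27) (b := 27) (by norm_num)
  have b4 := PySem.Int.mod_lt (PySem.Int.floordiv a 27) (b := 27) (by norm_num)
  have b5 := PySem.Int.mod_nonneg a (b := 729) (by norm_num)
  have b6 := PySem.Int.mod_lt a (b := 729) (by norm_num)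
  omega

-- ===== VERDICT (by name: the statement is the Claim_ definition above) =====
theorem unsigned_value_to_tryte_spec : Claim_equal_unsigned_value_to_tryte := by
  intro value _
  unfold Spec_unsigned_value_to_tryte unsigned_value_to_tryte unsigned_value_to_tryte_alt
  have e1 : value - 9841 + 13 = value - 27 * 364 := by ring
  have s1 := pvShift27 value 364
  have e2 : PySem.Int.floordiv value 27 - 364 + 13 = PySem.Int.floordiv value 27 - 27 * 13 := by
    ring
  have s2 := pvShift27 (PySem.Int.floordiv value 27) 13
  have s3 := pvDivDiv value
  simp only [List.range, List.range.loop, List.foldl, pvStepA_eq, e1, s1.1, s1.2, e2,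
    s2.1, s2.2, s3, List.nil_append, List.cons_append]
  simp
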